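-- pv_equiv track=rewrite | github.com/pair0/Programmers | 연습문제/LV0/중복된 문자 제거.py | solution
-- ===== SOURCE A (Python) =====
-- def solution(my_string):
--     answer = ''
--
--     for i in my_string:
--         if i in list(answer):
--             continue
--         else:
--             answer += i
--
--     return answer
-- ===== SOURCE B (Python) =====
-- def solution(my_string):
--     chars = list(my_string)
--     return ''.join(c for i, c in enumerate(chars) if chars.index(c) == i)
-- ===== Notes on version B (the rewrite author's own statement) =====
-- stated objective: alternative
-- what changed: Replaces the stateful loop that grows an accumulator string and tests membership against it by a stateless enumerate-filter that keeps a character exactly when its first index in the original string equals its position.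
import Mathlib
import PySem

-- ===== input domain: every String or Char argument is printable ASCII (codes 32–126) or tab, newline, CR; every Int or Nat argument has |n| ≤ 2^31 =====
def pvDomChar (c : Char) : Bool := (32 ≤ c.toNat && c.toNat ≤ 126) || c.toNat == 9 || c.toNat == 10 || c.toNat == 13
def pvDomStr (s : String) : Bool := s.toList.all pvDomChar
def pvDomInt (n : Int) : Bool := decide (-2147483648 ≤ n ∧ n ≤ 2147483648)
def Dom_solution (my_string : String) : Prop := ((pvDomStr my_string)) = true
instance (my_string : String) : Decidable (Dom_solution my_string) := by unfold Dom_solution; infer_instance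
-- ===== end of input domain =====

-- B replaces A's grow-and-test accumulator loop by a stateless first-index filter over enumerate(s); same result, similar cost.

-- ===== PORT A =====
-- answer starts '', each char appended unless already in answer
def solution (my_string : String) : String :=
  String.mk (my_string.toList.foldl
    (fun answer i => if i ∈ answer then answer else answer ++ [i]) [])

-- ===== PORT B =====
-- ''.join(c for i, c in enumerate(chars) if chars.index(c) == i)
def solution_alt (my_string : String) : String :=
  let chars := my_string.toList
  String.mk (((PySem.List.enumerate chars 0).filter
      (fun p => (PySem.List.index? chars p.2).map (fun n => (n : Int)) == some p.1)).map Prod.snd)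

-- ===== PRECONDITION & SPEC =====
def Spec_solution (my_string : String) (out : String) : Prop := out = solution_alt my_string
instance (my_string : String) (out : String) : Decidable (Spec_solution my_string out) := by unfold Spec_solution; infer_instance

-- ===== CLAIM (what is proved, stated in full; the proofs are below) =====
def Claim_equal_solution : Prop := ∀ (my_string : String), Dom_solution my_string → Spec_solution my_string (solution my_string)

-- ===== LEMMAS AND PROOFS =====

theorem pv_index?_append_cons_of_not_mem (pre t : List Char) (c : Char) (h : c ∉ pre) :
    PySem.List.index? (pre ++ c :: t) c = some pre.length := by
  rw [PySem.List.index?_eq_some_iff]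
  exact ⟨pre, t, rfl, rfl, h⟩

theorem pv_index?_append_cons_of_mem (pre t : List Char) (c : Char) (h : c ∈ pre) :
    ¬ ((PySem.List.index? (pre ++ c :: t) c).map (fun n => (n : Int)) = some (pre.length : Int)) := by
  rw [PySem.List.index?_append_of_mem _ h]
  obtain ⟨k, hk⟩ := Option.isSome_iff_exists.1 ((PySem.List.index?_isSome_iff pre c).2 h)
  obtain ⟨p1, suf, hsplit, hlen, -⟩ := (PySem.List.index?_eq_some_iff pre c k).1 hk
  have hklt : k < pre.length := by
    subst hlen; rw [hsplit]; simp only [List.length_append, List.length_cons]; omega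
  rw [hk]
  intro hcon
  simp at hcon
  omega

theorem pv_main (rest : List Char) : ∀ (pre acc : List Char),
    (∀ c, c ∈ acc ↔ c ∈ pre) →
    rest.foldl (fun answer i => if i ∈ answer then answer else answer ++ [i]) acc =
      acc ++ ((PySem.List.enumerate rest (pre.length : Int)).filter
        (fun p => (PySem.List.index? (pre ++ rest) p.2).map (fun n => (n : Int)) == some p.1)).map Prod.snd := by
  induction rest with
  | nil => intro pre acc _; simp [PySem.List.enumerate_nil]
  | cons c t ih =>
    intro pre acc hinv
    rw [PySem.List.enumerate_cons, List.filter_cons]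
    by_cases hc : c ∈ pre
    · have hacc : c ∈ acc := (hinv c).2 hc
      have hcond := pv_index?_append_cons_of_mem pre t c hc
      have hfalse : ((PySem.List.index? (pre ++ c :: t) c).map (fun n => (n : Int)) == some (pre.length : Int)) = false :=
        beq_eq_false_iff_ne.2 hcond
      simp only [List.foldl_cons, if_pos hacc, hfalse]
      have hinv' : ∀ x, x ∈ acc ↔ x ∈ pre ++ [c] := by
        intro x
        constructor
        · intro hx; exact List.mem_append.2 (Or.inl ((hinv x).1 hx))
        · intro hx
          rcases List.mem_append.1 hx with hx | hx
          · exact (hinv x).2 hx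
          · simp only [List.mem_singleton] at hx; subst hx; exact hacc
      have := ih (pre ++ [c]) acc hinv'
      simp only [List.length_append, List.length_singleton, List.append_assoc,
        List.singleton_append, Nat.cast_add, Nat.cast_one] at this
      simp only [Bool.false_eq_true, if_false]
      exact this
    · have hacc : c ∉ acc := fun h => hc ((hinv c).1 h)
      have hcond := pv_index?_append_cons_of_not_mem pre t c hc
      have htrue : ((PySem.List.index? (pre ++ c :: t) c).map (fun n => (n : Int)) == some (pre.length : Int)) = true := by
        rw [hcond]; simp
      simp only [List.foldl_cons, if_neg hacc, htrue]
      have hinv' : ∀ x, x ∈ acc ++ [c] ↔ x ∈ pre ++ [c] := by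
        intro x; simp [hinv x]
      have := ih (pre ++ [c]) (acc ++ [c]) hinv'
      simp only [List.length_append, List.length_singleton, List.append_assoc,
        List.singleton_append, Nat.cast_add, Nat.cast_one] at this
      rw [this]
      simp

-- ===== VERDICT (by name: the statement is the Claim_ definition above) =====
theorem solution_spec : Claim_equal_solution := by
  intro s _
  unfold Spec_solution solution solution_alt
  have h := pv_main s.toList [] [] (by simp)
  simp only [List.length_nil, Nat.cast_zero, List.nil_append] at h
  rw [h]
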